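-- pv_equiv track=rewrite | github.com/amol-ship-it/agi-core | domains/arc/fingerprint.py | _is_recoloring_pair
-- ===== SOURCE A (Python) =====
-- def _is_recoloring_pair(inp: list[list[int]], out: list[list[int]]) -> bool:
--     """Check if output has same non-zero structure as input but different colors."""
--     if not inp or not out or not inp[0] or not out[0]:
--         return False
--     h_in, w_in = len(inp), len(inp[0])
--     h_out, w_out = len(out), len(out[0])
--     if h_in != h_out or w_in != w_out:
--         return False
--
--     # Check that non-zero positions are identical
--     has_diff = False
--     for r in range(h_in):
--         for c in range(w_in):
--             in_nz = inp[r][c] != 0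
--             out_nz = out[r][c] != 0
--             if in_nz != out_nz:
--                 return False
--             if in_nz and inp[r][c] != out[r][c]:
--                 has_diff = True
--     return has_diff
-- ===== SOURCE B (Python) =====
-- def _is_recoloring_pair(inp: list[list[int]], out: list[list[int]]) -> bool:
--     """Check if output has same non-zero structure as input but different colors."""
--     if not inp or not out or not inp[0] or not out[0]:
--         return False
--     if len(inp) != len(out) or len(inp[0]) != len(out[0]):
--         return False
--     # Pass 1: the non-zero masks must coincide.
--     if not all((a != 0) == (b != 0)
--                for ri, ro in zip(inp, out) for a, b in zip(ri, ro)):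
--         return False
--     # Pass 2: some non-zero cell must have changed color.
--     return any(a != b for ri, ro in zip(inp, out) for a, b in zip(ri, ro) if a != 0)
-- ===== Notes on version B (the rewrite author's own statement) =====
-- stated objective: simpler
-- what changed: Replaces the fused index-driven double loop with an early has_diff flag by two separate structural zip passes: one checking the non-zero masks agree, one detecting a changed non-zero cell.
-- outside the precondition, e.g. on _is_recoloring_pair([[1, 1], [1, 1, 5]], [[1, 1], [1, 1, 6]]): A returns False, B returns True; on _is_recoloring_pair([[1, 2], [3]], [[1, 2], [3]]): A raises IndexError, B returns False
import Mathlib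
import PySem

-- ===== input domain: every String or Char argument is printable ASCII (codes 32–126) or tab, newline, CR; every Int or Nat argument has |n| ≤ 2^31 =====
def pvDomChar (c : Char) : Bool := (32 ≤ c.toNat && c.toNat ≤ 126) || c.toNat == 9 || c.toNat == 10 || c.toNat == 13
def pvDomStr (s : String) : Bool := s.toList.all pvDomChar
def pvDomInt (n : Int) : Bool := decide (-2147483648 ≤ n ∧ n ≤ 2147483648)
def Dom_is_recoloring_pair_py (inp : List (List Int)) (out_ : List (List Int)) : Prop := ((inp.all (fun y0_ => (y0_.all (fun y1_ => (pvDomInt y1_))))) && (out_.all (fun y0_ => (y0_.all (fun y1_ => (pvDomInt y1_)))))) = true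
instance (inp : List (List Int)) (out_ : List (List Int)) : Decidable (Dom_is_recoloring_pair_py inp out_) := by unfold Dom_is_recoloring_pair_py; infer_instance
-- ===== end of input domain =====

-- B replaces A's fused index-driven double loop (early-return + has_diff flag) by two separate
-- structural zip passes (mask agreement, then changed-color detection); objective: simpler.

-- ===== PORT A =====
-- inner loop 'for c in range(w_in)' with early return encoded as Option (none = returned False)
def pvAInner (rin rout : List Int) (w : Int) (hd : Bool) : Option Bool :=
  (PySem.List.pyRange 0 w 1).foldl (fun st c =>
    match st with
    | none => none
    | some hd =>
      let iv := PySem.List.pyGetD rin c 0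
      let ov := PySem.List.pyGetD rout c 0
      if ((iv != 0) != (ov != 0)) then none
      else if (iv != 0) && (iv != ov) then some true else some hd) (some hd)

def is_recoloring_pair_py (inp : List (List Int)) (out_ : List (List Int)) : Bool :=
  if inp.isEmpty || out_.isEmpty || (inp.headD []).isEmpty || (out_.headD []).isEmpty then false
  else
    let h_in : Int := inp.length
    let w_in : Int := (inp.headD []).length
    let h_out : Int := out_.length
    let w_out : Int := (out_.headD []).length
    if h_in != h_out || w_in != w_out then false
    else
      match (PySem.List.pyRange 0 h_in 1).foldl (fun st r =>
        match st with
        | none => none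
        | some hd => pvAInner (PySem.List.pyGetD inp r []) (PySem.List.pyGetD out_ r []) w_in hd)
        (some false) with
      | none => false
      | some hd => hd

-- ===== PORT B =====
def is_recoloring_pair_py_alt (inp : List (List Int)) (out_ : List (List Int)) : Bool :=
  if inp.isEmpty || out_.isEmpty || (inp.headD []).isEmpty || (out_.headD []).isEmpty then false
  else if inp.length != out_.length || (inp.headD []).length != (out_.headD []).length then false
  else if !((inp.zip out_).all (fun p => (p.1.zip p.2).all (fun q => (q.1 != 0) == (q.2 != 0)))) then false
  else (inp.zip out_).any (fun p => (p.1.zip p.2).any (fun q => (q.1 != 0) && (q.1 != q.2)))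

-- ===== PRECONDITION & SPEC =====
-- Pre_ excludes ragged grids that pass the guards and the dimension check: there A's
-- range-indexing over the first row's width can raise IndexError, and where it still returns,
-- which cells beyond/short of the first row's width count is an accident of the indexing.
def Pre_is_recoloring_pair_py (inp : List (List Int)) (out_ : List (List Int)) : Prop :=
  (inp = [] ∨ out_ = [] ∨ inp.headD [] = [] ∨ out_.headD [] = [] ∨
   inp.length ≠ out_.length ∨ (inp.headD []).length ≠ (out_.headD []).length) ∨
  ((∀ r ∈ inp, r.length = (inp.headD []).length) ∧ (∀ r ∈ out_, r.length = (out_.headD []).length))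
instance (inp : List (List Int)) (out_ : List (List Int)) : Decidable (Pre_is_recoloring_pair_py inp out_) := by unfold Pre_is_recoloring_pair_py; infer_instance

def pvWitness_is_recoloring_pair_py : List (List Int) × List (List Int) :=
  ([[1, 2], [3, 4]], [[2, 1], [3, 4]])

def Spec_is_recoloring_pair_py (inp : List (List Int)) (out_ : List (List Int)) (out : Bool) : Prop := out = is_recoloring_pair_py_alt inp out_
instance (inp : List (List Int)) (out_ : List (List Int)) (out : Bool) : Decidable (Spec_is_recoloring_pair_py inp out_ out) := by unfold Spec_is_recoloring_pair_py; infer_instance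

-- ===== CLAIM (what is proved, stated in full; the proofs are below) =====
def Claim_equal_is_recoloring_pair_py : Prop := ∀ (inp : List (List Int)) (out_ : List (List Int)), Dom_is_recoloring_pair_py inp out_ → Pre_is_recoloring_pair_py inp out_ → Spec_is_recoloring_pair_py inp out_ (is_recoloring_pair_py inp out_)

-- ===== LEMMAS AND PROOFS =====

theorem pvFoldNone {α : Type} (l : List α) (f : Bool → α → Option Bool) :
    l.foldl (fun st c => match st with | none => none | some hd => f hd c) none = none := by
  induction l with
  | nil => rfl
  | cons x xs ih => simpa using ih

-- a fold over range-indices of two equal-length lists is a fold over their zip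
theorem pvFoldIdxZip {α β γ : Type} (xs : List α) (ys : List β) (dx : α) (dy : β)
    (f : γ → α → β → γ) (h : ys.length = xs.length) (init : γ) :
    (PySem.List.pyRange 0 (xs.length : Int) 1).foldl
      (fun st r => f st (PySem.List.pyGetD xs r dx) (PySem.List.pyGetD ys r dy)) init
    = (xs.zip ys).foldl (fun st p => f st p.1 p.2) init := by
  have hz : (xs.zip ys).length = xs.length := by
    rw [List.length_zip, h, Nat.min_self]
  have hcongr : (PySem.List.pyRange 0 (xs.length : Int) 1).foldl
      (fun st r => f st (PySem.List.pyGetD xs r dx) (PySem.List.pyGetD ys r dy)) init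
      = (PySem.List.pyRange 0 ((xs.zip ys).length : Int) 1).foldl
      (fun st r => (fun st (p : α × β) => f st p.1 p.2) st (PySem.List.pyGetD (xs.zip ys) r (dx, dy))) init := by
    rw [hz]
    refine PySem.List.foldl_congr_mem _ _ _ _ ?_
    intro acc r hr
    obtain ⟨h0, h1⟩ := PySem.List.mem_pyRange_one.mp hr
    rw [PySem.List.pyGetD_eq_getElem xs dx h0 h1,
        PySem.List.pyGetD_eq_getElem ys dy h0 (by omega),
        PySem.List.pyGetD_eq_getElem (xs.zip ys) (dx, dy) h0 (by rw [hz]; exact h1),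
        List.getElem_zip]
  rw [hcongr, PySem.List.foldl_pyRange_zero_pyGetD' (xs.zip ys) (dx, dy)
      (fun st (p : α × β) => f st p.1 p.2) init]

-- characterisation of A's inner loop on the zipped cells
theorem pvInnerChar (cells : List (Int × Int)) (hd : Bool) :
    cells.foldl (fun st q =>
      match st with
      | none => none
      | some hd =>
        if ((q.1 != 0) != (q.2 != 0)) then none
        else if (q.1 != 0) && (q.1 != q.2) then some true else some hd) (some hd)
    = if cells.all (fun q => (q.1 != 0) == (q.2 != 0))
      then some (hd || cells.any (fun q => (q.1 != 0) && (q.1 != q.2)))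
      else none := by
  induction cells generalizing hd with
  | nil => simp
  | cons q qs ih =>
    simp only [List.foldl_cons, List.all_cons, List.any_cons]
    by_cases hm : ((q.1 != 0) != (q.2 != 0)) = true
    · have hbeq : ((q.1 != 0) == (q.2 != 0)) = false := by
        revert hm; cases (q.1 != 0) <;> cases (q.2 != 0) <;> simp
      rw [if_pos hm, pvFoldNone, hbeq, Bool.false_and, if_neg (by simp)]
    · have hbeq : ((q.1 != 0) == (q.2 != 0)) = true := by
        revert hm; cases (q.1 != 0) <;> cases (q.2 != 0) <;> simp
      rw [if_neg hm, hbeq, Bool.true_and]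
      by_cases hdiff : ((q.1 != 0) && (q.1 != q.2)) = true
      · rw [if_pos hdiff, ih true, hdiff]
        cases (qs.all fun q => (q.1 != 0) == (q.2 != 0)) <;> simp
      · rw [if_neg hdiff, ih hd, Bool.not_eq_true] at *
        rw [hdiff, Bool.false_or]

-- characterisation of A's outer loop (early return encoded as none)
theorem pvOuterChar {α : Type} (l : List α) (ok dv : α → Bool) (hd : Bool) :
    l.foldl (fun st x =>
      match st with
      | none => none
      | some hd => if ok x then some (hd || dv x) else none) (some hd)
    = if l.all ok then some (hd || l.any dv) else none := by
  induction l generalizing hd with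
  | nil => simp
  | cons p ps ih =>
    simp only [List.foldl_cons, List.all_cons, List.any_cons]
    by_cases hok : ok p = true
    · rw [if_pos hok, ih (hd || dv p), hok, Bool.true_and]
      cases (ps.all ok) <;> simp [Bool.or_assoc]
    · rw [if_neg hok, pvFoldNone]
      rw [Bool.not_eq_true] at hok
      rw [hok, Bool.false_and, if_neg (by simp)]

-- pvAInner on rows of equal length w is the mask-check / diff-scan of the zipped cells
theorem pvAInnerChar (rin rout : List Int) (hd : Bool) (hlen : rout.length = rin.length) :
    pvAInner rin rout (rin.length : Int) hd
    = if (rin.zip rout).all (fun q => (q.1 != 0) == (q.2 != 0))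
      then some (hd || (rin.zip rout).any (fun q => (q.1 != 0) && (q.1 != q.2)))
      else none := by
  unfold pvAInner
  rw [pvFoldIdxZip rin rout 0 0
      (fun st a b =>
        match st with
        | none => none
        | some hd => if ((a != 0) != (b != 0)) then none
                     else if (a != 0) && (a != b) then some true else some hd) hlen (some hd)]
  exact pvInnerChar (rin.zip rout) hd

-- ===== VERDICT (by name: the statement is the Claim_ definition above) =====
theorem is_recoloring_pair_py_spec : Claim_equal_is_recoloring_pair_py := by
  intro inp out_ _ hpre
  show is_recoloring_pair_py inp out_ = is_recoloring_pair_py_alt inp out_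
  unfold is_recoloring_pair_py is_recoloring_pair_py_alt
  by_cases hg : (inp.isEmpty || out_.isEmpty || (inp.headD []).isEmpty || (out_.headD []).isEmpty) = true
  · rw [if_pos hg, if_pos hg]
  · rw [if_neg hg, if_neg hg]
    dsimp only
    by_cases hh : inp.length = out_.length
    · by_cases hw : (inp.headD []).length = (out_.headD []).length
      · rw [if_neg (by rw [hh, hw]; simp), if_neg (by rw [hh, hw]; simp)]
        -- outer fold over row indices = fold over the zipped rows
        rw [pvFoldIdxZip inp out_ [] []
            (fun st a b =>
              match st with
              | none => none
              | some hd => pvAInner a b ((inp.headD []).length : Int) hd) hh.symm (some false)]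
        -- each row step is the mask/diff step (rows are rectangular by Pre_)
        rw [PySem.List.foldl_congr_mem (inp.zip out_) _
            (fun st p =>
              match st with
              | none => none
              | some hd => if (p.1.zip p.2).all (fun q => (q.1 != 0) == (q.2 != 0))
                           then some (hd || (p.1.zip p.2).any (fun q => (q.1 != 0) && (q.1 != q.2)))
                           else none) (some false) ?_]
        · rw [pvOuterChar]
          cases hall : ((inp.zip out_).all fun p => (p.1.zip p.2).all fun q => (q.1 != 0) == (q.2 != 0)) <;>
            simp
        · have hrect := hpre.resolve_left (by
            simp only [List.isEmpty_iff, Bool.or_eq_true, not_or] at hg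
            rintro (h | h | h | h | h | h) <;> simp_all)
          intro st p hp
          obtain ⟨hp1, hp2⟩ := List.of_mem_zip hp
          have h1 : p.1.length = (inp.headD []).length := hrect.1 p.1 hp1
          have h2 : p.2.length = p.1.length := by rw [hrect.2 p.2 hp2, h1, hw]
          cases st with
          | none => rfl
          | some hd =>
            dsimp only
            rw [← h1, pvAInnerChar p.1 p.2 hd h2]
      · rw [if_pos (by rw [Bool.or_eq_true]; right; rw [bne_iff_ne]; exact_mod_cast hw),
            if_pos (by rw [Bool.or_eq_true]; right; rw [bne_iff_ne]; exact hw)]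
    · rw [if_pos (by rw [Bool.or_eq_true]; left; rw [bne_iff_ne]; exact_mod_cast hh),
          if_pos (by rw [Bool.or_eq_true]; left; rw [bne_iff_ne]; exact hh)]
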